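-- pv_equiv track=rewrite | github.com/BardGeesaman/Notion_RAG | amprenta_rag/api/schemas.py | validate_url
-- ===== SOURCE A (Python) =====
-- def validate_url(v: str) -> str:
--     """Validate URL is safe (no javascript:, data:, etc.)."""
--     if not v:
--         return v
--     v = v.strip()
--     # Block dangerous URL schemes
--     dangerous_schemes = ['javascript:', 'data:', 'vbscript:', 'file:']
--     v_lower = v.lower()
--     for scheme in dangerous_schemes:
--         if v_lower.startswith(scheme):
--             raise ValueError(f"Dangerous URL scheme: {scheme}")
--     return v
-- ===== SOURCE B (Python) =====
-- def validate_url(v: str) -> str: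
--     """Validate URL is safe (no javascript:, data:, etc.)."""
--     if not v:
--         return v
--     v = v.strip()
--     v_lower = v.lower()
--     i = v_lower.find(':')
--     if i != -1 and v_lower[:i] in {'javascript', 'data', 'vbscript', 'file'}:
--         raise ValueError(f"Dangerous URL scheme: {v_lower[:i]}:")
--     return v
-- ===== Notes on version B (the rewrite author's own statement) =====
-- stated objective: idiomatic
-- what changed: B extracts the scheme once (find the first ':' and take the prefix) and does a single membership test against a set of bare scheme names, instead of A's loop of four startswith checks over colon-suffixed strings.
import Mathlib
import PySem

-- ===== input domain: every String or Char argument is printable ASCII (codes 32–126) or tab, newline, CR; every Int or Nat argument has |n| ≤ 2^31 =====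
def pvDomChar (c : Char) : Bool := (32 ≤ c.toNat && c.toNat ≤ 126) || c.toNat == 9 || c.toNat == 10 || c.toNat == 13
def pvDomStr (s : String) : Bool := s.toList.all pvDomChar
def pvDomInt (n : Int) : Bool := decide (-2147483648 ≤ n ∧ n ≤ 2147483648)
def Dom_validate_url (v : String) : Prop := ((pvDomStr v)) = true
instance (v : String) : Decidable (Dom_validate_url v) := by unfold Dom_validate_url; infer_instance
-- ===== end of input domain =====

-- B extracts the URL scheme once (prefix before the first ':') and tests set membership,
-- instead of A's loop of startswith checks; objective: more idiomatic, same behaviour.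
-- Pre_ excludes exactly the inputs on which A raises ValueError (dangerous scheme); B raises there too.


-- ===== PORT A =====
-- for scheme in dangerous_schemes: if v_lower.startswith(scheme): raise  →  List.find?;
-- the 'some' branch is Python's raise ValueError, excluded by Pre_ (dummy value "").
def validate_url (v : String) : String :=
  if v = "" then v
  else
    let s := PySem.Str.strip v
    let vl := PySem.Str.lower s
    match ["javascript:", "data:", "vbscript:", "file:"].find?
        (fun scheme => PySem.Str.startswith vl scheme) with
    | some _ => ""   -- raise ValueError(f"Dangerous URL scheme: {scheme}") : outside Pre_
    | none => s

-- ===== PORT B =====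
def validate_url_alt (v : String) : String :=
  if v = "" then v
  else
    let s := PySem.Str.strip v
    let vl := PySem.Str.lower s
    let i := PySem.Str.find vl ":"
    if i ≠ -1 ∧ PySem.Str.slice vl none (some i) ∈ ["javascript", "data", "vbscript", "file"] then
      ""   -- raise ValueError(f"Dangerous URL scheme: {v_lower[:i]}:") : outside Pre_
    else s

-- ===== PRECONDITION & SPEC =====
-- Pre_ excludes exactly the inputs on which Python A raises ValueError: a stripped,
-- lowercased value starting with one of the four dangerous schemes (B raises there too).
def Pre_validate_url (v : String) : Prop :=
  v = "" ∨
    (["javascript:", "data:", "vbscript:", "file:"].all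
      (fun scheme => !PySem.Str.startswith (PySem.Str.lower (PySem.Str.strip v)) scheme)) = true
instance (v : String) : Decidable (Pre_validate_url v) := by unfold Pre_validate_url; infer_instance
def pvWitness_validate_url : String := " https://example.com "

def Spec_validate_url (v : String) (out : String) : Prop := out = validate_url_alt v
instance (v : String) (out : String) : Decidable (Spec_validate_url v out) := by unfold Spec_validate_url; infer_instance

-- ===== CLAIM (what is proved, stated in full; the proofs are below) =====
def Claim_equal_validate_url : Prop := ∀ (v : String), Dom_validate_url v → Pre_validate_url v → Spec_validate_url v (validate_url v)

-- ===== LEMMAS AND PROOFS =====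

set_option maxHeartbeats 1000000

-- If the first ':' of L is at index i, then (prefix before it) ++ ":" is a prefix of L.
theorem pv_prefix_colon (L : List Char) (hi : PySem.Chars.find L [':'] ≠ -1) :
    PySem.Chars.startswith L (L.take (PySem.Chars.find L [':']).toNat ++ [':']) = true := by
  have h0 : (0:Int) ≤ PySem.Chars.find L [':'] := by
    rcases (PySem.Chars.neg_one_le_find L [':']).lt_or_eq with h | h
    · omega
    · exact absurd h.symm hi
  obtain ⟨hpre, -⟩ := PySem.Chars.find_spec h0
  rw [PySem.Chars.startswith_iff]
  obtain ⟨t, ht⟩ := hpre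
  calc L.take (PySem.Chars.find L [':']).toNat ++ [':']
      <+: L.take (PySem.Chars.find L [':']).toNat ++ ([':'] ++ t) :=
        ⟨t, by simp⟩
    _ = L := by rw [ht]; exact List.take_append_drop _ L

theorem validate_url_agrees (v : String) (hp : Pre_validate_url v) :
    validate_url v = validate_url_alt v := by
  unfold validate_url validate_url_alt
  by_cases hv : v = ""
  · simp [hv]
  · simp only [if_neg hv]
    rcases hp with h | h
    · exact absurd h hv
    simp only [List.all_cons, List.all_nil, Bool.and_true, Bool.and_eq_true,
      Bool.not_eq_eq_eq_not, Bool.not_true] at h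
    obtain ⟨h1, h2, h3, h4⟩ := h
    set vl := PySem.Str.lower (PySem.Str.strip v) with hvl
    -- A side: no scheme matches, so find? = none
    have hfind : (["javascript:", "data:", "vbscript:", "file:"].find?
        (fun scheme => PySem.Str.startswith vl scheme)) = none := by
      simp only [List.find?, h1, h2, h3, h4]
    rw [hfind]
    -- B side: the condition is false
    have hcond : ¬ (PySem.Str.find vl ":" ≠ -1 ∧
        PySem.Str.slice vl none (some (PySem.Str.find vl ":")) ∈
          ["javascript", "data", "vbscript", "file"]) := by
      rintro ⟨hi, hmem⟩
      have hi' : PySem.Chars.find vl.toList [':'] ≠ -1 := by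
        intro hc; apply hi
        have hb := PySem.Str.find_eq vl ":"
        rw [hb]; exact hc
      have h0 : (0:Int) ≤ PySem.Chars.find vl.toList [':'] := by
        rcases (PySem.Chars.neg_one_le_find vl.toList [':']).lt_or_eq with hlt | heq
        · omega
        · exact absurd heq.symm hi'
      have hpref := pv_prefix_colon vl.toList hi'
      have hslice : (PySem.Str.slice vl none (some (PySem.Str.find vl ":"))).toList
          = vl.toList.take (PySem.Chars.find vl.toList [':']).toNat := by
        simp [PySem.List.slice_to _ h0]
      -- whichever scheme matched, vl starts with that scheme plus ':', contradicting Pre_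
      have key : ∀ w : String,
          PySem.Str.slice vl none (some (PySem.Str.find vl ":")) = w →
          PySem.Chars.startswith vl.toList (w.toList ++ [':']) = true := by
        intro w hw
        have hwl : w.toList = vl.toList.take (PySem.Chars.find vl.toList [':']).toNat := by
          rw [← hw, hslice]
        rw [hwl]; exact hpref
      simp only [List.mem_cons, List.not_mem_nil, or_false] at hmem
      rcases hmem with hc | hc | hc | hc
      · have hs := key _ hc
        have : PySem.Str.startswith vl "javascript:" = true := by
          rw [PySem.Str.startswith_eq,
            show ("javascript:").toList = ("javascript").toList ++ [':'] from rfl]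
          exact hs
        rw [h1] at this; exact Bool.false_ne_true this
      · have hs := key _ hc
        have : PySem.Str.startswith vl "data:" = true := by
          rw [PySem.Str.startswith_eq,
            show ("data:").toList = ("data").toList ++ [':'] from rfl]
          exact hs
        rw [h2] at this; exact Bool.false_ne_true this
      · have hs := key _ hc
        have : PySem.Str.startswith vl "vbscript:" = true := by
          rw [PySem.Str.startswith_eq,
            show ("vbscript:").toList = ("vbscript").toList ++ [':'] from rfl]
          exact hs
        rw [h3] at this; exact Bool.false_ne_true this
      · have hs := key _ hc
        have : PySem.Str.startswith vl "file:" = true := by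
          rw [PySem.Str.startswith_eq,
            show ("file:").toList = ("file").toList ++ [':'] from rfl]
          exact hs
        rw [h4] at this; exact Bool.false_ne_true this
    rw [if_neg hcond]

-- ===== VERDICT (by name: the statement is the Claim_ definition above) =====
theorem validate_url_spec : Claim_equal_validate_url := by
  intro v _ hp
  exact validate_url_agrees v hp
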